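-- pv_equiv track=rewrite | github.com/aarntn/VHACK_KAWAL_KAWAL | project/app/hybrid_fraud_api.py | detect_feature_columns_shape
-- ===== SOURCE A (Python) =====
-- def detect_feature_columns_shape(columns: list[str]) -> str:
--     if not columns:
--         return "unknown"
--
--     as_text = [str(col) for col in columns]
--     raw_markers = {"TransactionDT", "TransactionAmt", "device_risk_score"}
--     has_raw_markers = raw_markers.issubset(set(as_text))
--     has_preprocessed_markers = any(
--         name.startswith("numeric_canonical__")
--         or name.startswith("categorical_passthrough__")
--         or "__" in name
--         for name in as_text
--     )
--
--     if has_raw_markers and not has_preprocessed_markers: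
--         return "raw"
--     if has_preprocessed_markers and not has_raw_markers:
--         return "preprocessed"
--     if has_preprocessed_markers and has_raw_markers:
--         return "mixed"
--     return "unknown"
-- ===== SOURCE B (Python) =====
-- def detect_feature_columns_shape(columns: list[str]) -> str:
--     if not columns:
--         return "unknown"
--     raw_markers = {"TransactionDT", "TransactionAmt", "device_risk_score"}
--     found_raw = set()
--     has_pre = False
--     for col in columns:
--         name = str(col)
--         if "__" in name:
--             has_pre = True
--         if name in raw_markers:
--             found_raw.add(name)
--     has_raw = raw_markers <= found_raw
--     return {
--         (True, False): "raw",
--         (False, True): "preprocessed",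
--         (True, True): "mixed",
--         (False, False): "unknown",
--     }[(has_raw, has_pre)]
-- ===== Notes on version B (the rewrite author's own statement) =====
-- stated objective: faster
-- what changed: Single pass over the columns maintaining a found-raw set and a has-preprocessed flag (dropping the redundant startswith prefix scans, which '__' containment subsumes, and the separate set construction), with the classification read from a (has_raw, has_pre) table instead of the if/elif ladder.
import Mathlib
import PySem

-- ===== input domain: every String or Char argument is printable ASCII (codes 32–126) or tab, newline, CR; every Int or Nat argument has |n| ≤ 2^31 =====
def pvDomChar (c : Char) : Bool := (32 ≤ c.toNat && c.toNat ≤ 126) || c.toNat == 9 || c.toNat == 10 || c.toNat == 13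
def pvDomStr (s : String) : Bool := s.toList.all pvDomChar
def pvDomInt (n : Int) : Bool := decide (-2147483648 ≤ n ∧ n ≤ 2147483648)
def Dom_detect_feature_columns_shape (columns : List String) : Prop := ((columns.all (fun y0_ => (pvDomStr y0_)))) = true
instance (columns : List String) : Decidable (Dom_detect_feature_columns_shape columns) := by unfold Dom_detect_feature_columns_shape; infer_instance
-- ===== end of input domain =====

-- B: single pass maintaining a found-raw set and a has-preprocessed flag, result read
-- from a (has_raw, has_pre) table, instead of A's two full scans and if/elif ladder.


-- ===== PORT A =====
def detect_feature_columns_shape (columns : List String) : String :=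
  if columns = [] then "unknown"
  else
    let as_text := columns.map (fun col => col)   -- str(col) on a str is the identity
    let raw_markers : PySem.Set String :=
      PySem.Set.ofList ["TransactionDT", "TransactionAmt", "device_risk_score"]
    let has_raw_markers := PySem.Set.issubset raw_markers (PySem.Set.ofList as_text)
    let has_preprocessed_markers := as_text.any (fun name =>
      PySem.Str.startswith name "numeric_canonical__" ||
      PySem.Str.startswith name "categorical_passthrough__" ||
      PySem.Str.isIn "__" name)
    if has_raw_markers && !has_preprocessed_markers then "raw"
    else if has_preprocessed_markers && !has_raw_markers then "preprocessed"
    else if has_preprocessed_markers && has_raw_markers then "mixed"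
    else "unknown"

-- ===== PORT B =====
def pvRawMarkers : PySem.Set String :=
  PySem.Set.ofList ["TransactionDT", "TransactionAmt", "device_risk_score"]

-- the loop body of B's single pass
def pvStep (st : PySem.Set String × Bool) (col : String) : PySem.Set String × Bool :=
  let st1 := if PySem.Str.isIn "__" col then (st.1, true) else st
  if PySem.Set.contains pvRawMarkers col then (PySem.Set.add st1.1 col, st1.2) else st1

def detect_feature_columns_shape_alt (columns : List String) : String :=
  if columns = [] then "unknown"
  else
    let st := columns.foldl pvStep (PySem.Set.empty, false)
    let has_raw := PySem.Set.issubset pvRawMarkers st.1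
    ((PySem.Dict.ofList [((true, false), "raw"), ((false, true), "preprocessed"),
        ((true, true), "mixed"), ((false, false), "unknown")]).get?
      (has_raw, st.2)).getD "unknown"   -- key is always present; getD only totalises

-- ===== PRECONDITION & SPEC =====
def Spec_detect_feature_columns_shape (columns : List String) (out : String) : Prop := out = detect_feature_columns_shape_alt columns
instance (columns : List String) (out : String) : Decidable (Spec_detect_feature_columns_shape columns out) := by unfold Spec_detect_feature_columns_shape; infer_instance

-- ===== CLAIM (what is proved, stated in full; the proofs are below) =====
def Claim_equal_detect_feature_columns_shape : Prop := ∀ (columns : List String), Dom_detect_feature_columns_shape columns → Spec_detect_feature_columns_shape columns (detect_feature_columns_shape columns)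

-- ===== LEMMAS AND PROOFS =====

-- Both prefix tests in A are subsumed by the '__' infix test.
theorem pre_test_eq (name : String) :
    (PySem.Str.startswith name "numeric_canonical__" ||
     PySem.Str.startswith name "categorical_passthrough__" ||
     PySem.Str.isIn "__" name) = PySem.Str.isIn "__" name := by
  by_cases h : PySem.Str.isIn "__" name = true
  · simp only [h, Bool.or_true]
  · simp only [Bool.not_eq_true] at h
    rw [h]
    have hsw : ∀ p : String, ("__".toList <:+: p.toList) →
        PySem.Str.startswith name p = false := by
      intro p hp
      by_contra hc
      simp only [Bool.not_eq_false] at hc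
      have h1 : p.toList <+: name.toList := by
        rw [PySem.Str.startswith_eq] at hc
        exact (PySem.Chars.startswith_iff _ _).mp hc
      have h2 : ("__".toList : List Char) <:+: name.toList := hp.trans h1.isInfix
      have h3 := (PySem.Str.isIn_iff_infix "__" name).mpr h2
      rw [h] at h3; exact Bool.false_ne_true h3
    rw [hsw _ (by decide), hsw _ (by decide)]
    simp

-- One step of B's fold, written out.
theorem step_eq (st : PySem.Set String × Bool) (c : String) :
    pvStep st c =
      (if PySem.Set.contains pvRawMarkers c = true then PySem.Set.add st.1 c else st.1,
       st.2 || PySem.Str.isIn "__" c) := by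
  unfold pvStep
  split_ifs <;> simp_all

-- Invariant of B's single-pass fold.
theorem fold_inv (l : List String) (s0 : PySem.Set String) (b0 : Bool) :
    (l.foldl pvStep (s0, b0)).2 = (b0 || l.any (fun c => PySem.Str.isIn "__" c)) ∧
    ∀ x, x ∈ (l.foldl pvStep (s0, b0)).1 ↔
      x ∈ s0 ∨ (x ∈ l ∧ PySem.Set.contains pvRawMarkers x = true) := by
  induction l generalizing s0 b0 with
  | nil => simp
  | cons c t ih =>
    rw [List.foldl_cons, step_eq]
    constructor
    · rw [(ih _ _).1, List.any_cons, Bool.or_assoc]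
    · intro x
      rw [(ih _ _).2 x]
      simp only [PySem.Set.contains_iff, List.mem_cons]
      by_cases hraw : c ∈ pvRawMarkers <;>
        simp only [hraw, if_true, if_false, PySem.Set.mem_add] <;>
        by_cases hx : x = c <;>
        (try subst hx) <;> tauto

-- ===== VERDICT (by name: the statement is the Claim_ definition above) =====
theorem detect_feature_columns_shape_spec : Claim_equal_detect_feature_columns_shape := by
  intro columns _
  unfold Spec_detect_feature_columns_shape detect_feature_columns_shape detect_feature_columns_shape_alt
  by_cases hnil : columns = []
  · simp [hnil]
  · simp only [hnil, if_false]
    obtain ⟨h2, h1⟩ := fold_inv columns PySem.Set.empty false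
    have hpre : (columns.map (fun col => col)).any (fun name =>
        PySem.Str.startswith name "numeric_canonical__" ||
        PySem.Str.startswith name "categorical_passthrough__" ||
        PySem.Str.isIn "__" name) = columns.any (fun c => PySem.Str.isIn "__" c) := by
      simp only [List.map_id', pre_test_eq]
    have hraw : PySem.Set.issubset
        (PySem.Set.ofList ["TransactionDT", "TransactionAmt", "device_risk_score"])
        (PySem.Set.ofList (columns.map (fun col => col))) =
        PySem.Set.issubset pvRawMarkers (columns.foldl pvStep (PySem.Set.empty, false)).1 := by
      show PySem.Set.issubset pvRawMarkers _ = _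
      rw [Bool.eq_iff_iff, PySem.Set.issubset_iff, PySem.Set.issubset_iff]
      constructor <;> intro hs x hx <;> have hm := hs x hx
      · rw [h1 x]
        simp only [List.map_id', PySem.Set.mem_ofList] at hm
        exact Or.inr ⟨hm, (PySem.Set.contains_iff pvRawMarkers x).mpr hx⟩
      · rw [h1 x] at hm
        simp only [List.map_id', PySem.Set.mem_ofList]
        rcases hm with hm | ⟨hm, _⟩
        · simp [PySem.Set.empty] at hm
        · exact hm
    rw [hpre, hraw, h2]
    simp only [Bool.false_or]
    rcases Bool.eq_false_or_eq_true (PySem.Set.issubset pvRawMarkers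
        (columns.foldl pvStep (PySem.Set.empty, false)).1) with hR | hR <;>
      rcases Bool.eq_false_or_eq_true (columns.any
        (fun c => PySem.Str.isIn "__" c)) with hP | hP <;>
        rw [hR, hP] <;> rfl
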